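-- pv_equiv track=rewrite | github.com/rescrv/HyperDex | bindings/java.py | generate_api_func_cleanup
-- ===== SOURCE A (Python) =====
-- def generate_api_func_cleanup(func):
--     func = func.strip().strip(';')
--     func = func.replace('native ', '')
--     if len(func) > 85:
--         funcx, funcy = func.split('(', 1)
--         funcz = ''
--         for x in funcy.split(', '):
--             if funcz.count('<') == funcz.count('>'):
--                 if funcz:
--                     funcz += ',\n' + ' ' * 8
--             elif funcz:
--                 funcz += ', '
--             funcz += x
--         func = funcx + '(\n' + ' ' * 8 + funcz
--     return func + '\n'
-- ===== SOURCE B (Python) =====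
-- def generate_api_func_cleanup(func):
--     func = func.strip().strip(';')
--     func = func.replace('native ', '')
--     if len(func) > 85:
--         funcx, funcy = func.split('(', 1)
--         params = []
--         buf = ''
--         depth = 0
--         i = 0
--         while i < len(funcy):
--             if depth == 0 and funcy.startswith(', ', i):
--                 params.append(buf)
--                 buf = ''
--                 i += 2
--                 continue
--             c = funcy[i]
--             if c == '<':
--                 depth += 1
--             elif c == '>':
--                 depth -= 1
--             buf += c
--             i += 1
--         params.append(buf)
--         func = funcx + '(\n' + ' ' * 8 + (',\n' + ' ' * 8).join(params)
--     return func + '\n'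
-- ===== Notes on version B (the rewrite author's own statement) =====
-- stated objective: alternative
-- what changed: The split-on-', '-then-remerge token loop (with repeated funcz.count('<')/count('>') rescans of the growing result) is replaced by a single left-to-right character scan that keeps an integer angle-bracket depth and a parameter buffer, cutting a parameter exactly at each ', ' seen at depth 0, then joining the collected parameters once.
-- intended difference: On inputs whose cleaned-up signature is longer than 85 characters and whose text after the first '(' begins with ', ', A silently drops those leading separators (its accumulator is still empty so it skips them), while B keeps the empty leading parameter(s); B preserves the input text verbatim, which is the intended reformatting. — e.g. on generate_api_func_cleanup("f(, aaaaaaaaaaaaaaaaaaaaaaaaaaaaaaaaaaaaaaaaaaaaaaaaaaaaaaaaaaaaaaaaaaaaaaaaaaaaaaaaaa"): A returns "f(\n aaaaaaaaaaaaaaaaaaaaaaaaaaaaaaaaaaaaaaaaaaaaaaaaaaaaaaaaaaaaaaaaaaaaaaaaaaaaaaaaaa\n", B returns "f(\n ,\n aaaaaaaaaaaaaaaaaaaaaaaaaaaaaaaaaaaaaaaaaaaaaaaaaaaaaaaaaaaaaaaaaaaaaaaaaaaaaaaaaa\n"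
import Mathlib
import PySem

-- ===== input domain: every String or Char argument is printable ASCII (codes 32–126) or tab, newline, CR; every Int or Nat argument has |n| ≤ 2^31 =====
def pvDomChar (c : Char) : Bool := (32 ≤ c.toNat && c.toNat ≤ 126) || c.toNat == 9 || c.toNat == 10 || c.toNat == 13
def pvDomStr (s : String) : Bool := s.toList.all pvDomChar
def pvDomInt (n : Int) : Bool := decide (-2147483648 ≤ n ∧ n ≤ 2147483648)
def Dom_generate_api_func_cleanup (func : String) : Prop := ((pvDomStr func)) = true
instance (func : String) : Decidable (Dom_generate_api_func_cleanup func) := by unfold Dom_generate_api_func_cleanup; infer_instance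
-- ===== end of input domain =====

-- B replaces A's split-on-', '-and-remerge token loop (which rescans the accumulated result with
-- count('<')/count('>') at every token) by a single character scan with an integer bracket depth;
-- on signatures whose text after '(' starts with ', ' A drops those separators and B keeps them (see D_).


-- ===== PORT A =====
-- Source B's while loop: cut a parameter at each ', ' met at depth 0; otherwise consume characters one by
-- one, updating the depth ('<' / '>').  A ', ' met at nonzero depth is consumed here in one step as the
-- two ordinary characters ',' and ' ' — exactly what two iterations of Source B's loop do with it.
def scanParams : List Char → List Char → Int → List (List Char)
  | [], buf, _ => [buf]
  | ',' :: ' ' :: rest, buf, depth =>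
      if depth = 0 then buf :: scanParams rest [] 0
      else scanParams rest (buf ++ [',', ' ']) depth
  | c :: rest, buf, depth =>
      scanParams rest (buf ++ [c])
        (if c = '<' then depth + 1 else if c = '>' then depth - 1 else depth)

-- one step of A's loop body: separator choice by comparing '<' / '>' counts of funcz, then append the token
def funczStep (funcz x : List Char) : List Char :=
  let funcz :=
    if PySem.Chars.count funcz "<".toList = PySem.Chars.count funcz ">".toList then
      (if funcz ≠ [] then funcz ++ ",\n        ".toList else funcz)
    else
      (if funcz ≠ [] then funcz ++ ", ".toList else funcz)
  funcz ++ x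

def generate_api_func_cleanup (func : String) : String :=
  (if 85 < PySem.Str.len (PySem.Str.replace (PySem.Str.stripChars (PySem.Str.strip func) ";") "native " "") then
     match PySem.Str.splitMax? (PySem.Str.replace (PySem.Str.stripChars (PySem.Str.strip func) ";") "native " "") "(" 1 with
     | some [funcx, funcy] =>
         funcx ++ "(\n" ++ "        " ++
           String.ofList ((PySem.Chars.splitOn funcy.toList ", ".toList).foldl funczStep [])
     | _ => PySem.Str.replace (PySem.Str.stripChars (PySem.Str.strip func) ";") "native " ""
   else PySem.Str.replace (PySem.Str.stripChars (PySem.Str.strip func) ";") "native " "") ++ "\n"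

-- ===== PORT B =====
def generate_api_func_cleanup_alt (func : String) : String :=
  (if 85 < PySem.Str.len (PySem.Str.replace (PySem.Str.stripChars (PySem.Str.strip func) ";") "native " "") then
     -- funcx, funcy = func.split('(', 1): ported match-free (2-element check, then head / second element)
     if ((PySem.Str.splitMax? (PySem.Str.replace (PySem.Str.stripChars (PySem.Str.strip func) ";") "native " "") "(" 1).getD []).length = 2 then
       ((PySem.Str.splitMax? (PySem.Str.replace (PySem.Str.stripChars (PySem.Str.strip func) ";") "native " "") "(" 1).getD []).headI
         ++ "(\n" ++ "        "
         ++ String.ofList (PySem.Chars.join ",\n        ".toList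
              (scanParams (((PySem.Str.splitMax? (PySem.Str.replace (PySem.Str.stripChars (PySem.Str.strip func) ";") "native " "") "(" 1).getD []).tail.headI).toList [] 0))
     else PySem.Str.replace (PySem.Str.stripChars (PySem.Str.strip func) ";") "native " ""
   else PySem.Str.replace (PySem.Str.stripChars (PySem.Str.strip func) ";") "native " "") ++ "\n"

-- ===== PRECONDITION & SPEC =====
-- Pre_ excludes exactly the inputs where A raises ValueError: cleaned-up signature longer than
-- 85 characters but containing no '(' (the 2-element unpacking of split('(', 1) fails; B raises there too).
def Pre_generate_api_func_cleanup (func : String) : Prop :=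
  85 < PySem.Str.len (PySem.Str.replace (PySem.Str.stripChars (PySem.Str.strip func) ";") "native " "") →
  PySem.Str.isIn "(" (PySem.Str.replace (PySem.Str.stripChars (PySem.Str.strip func) ";") "native " "") = true
instance (func : String) : Decidable (Pre_generate_api_func_cleanup func) := by
  unfold Pre_generate_api_func_cleanup; infer_instance

def pvWitness_generate_api_func_cleanup : String := "void f(int a, int b)"

-- On inputs whose cleaned-up signature is longer than 85 characters and whose text after the first '('
-- begins with ', ', A silently drops those leading separators (its accumulator is still empty, so the
-- separator re-insertion is skipped), while B keeps the empty leading parameter(s); B preserves the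
-- input text verbatim, which is the intended reformatting.
def D_generate_api_func_cleanup (func : String) : Prop :=
  let p := PySem.Str.replace (PySem.Str.stripChars (PySem.Str.strip func) ";") "native " ""
  85 < PySem.Str.len p ∧ '(' ∈ p.toList ∧
    [',', ' '] <+: ((p.toList.dropWhile (· ≠ '(')).tail)
instance (func : String) : Decidable (D_generate_api_func_cleanup func) := by
  unfold D_generate_api_func_cleanup; infer_instance

def Spec_generate_api_func_cleanup (func : String) (out : String) : Prop :=
  ¬ D_generate_api_func_cleanup func → out = generate_api_func_cleanup_alt func
instance (func : String) (out : String) : Decidable (Spec_generate_api_func_cleanup func out) := by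
  unfold Spec_generate_api_func_cleanup; infer_instance

def pvDiffWitness_generate_api_func_cleanup : String :=
  "f(, aaaaaaaaaaaaaaaaaaaaaaaaaaaaaaaaaaaaaaaaaaaaaaaaaaaaaaaaaaaaaaaaaaaaaaaaaaaaaaaaaa"

def pvDiffWitnessOut_generate_api_func_cleanup : String × String :=
  ("f(\n        aaaaaaaaaaaaaaaaaaaaaaaaaaaaaaaaaaaaaaaaaaaaaaaaaaaaaaaaaaaaaaaaaaaaaaaaaaaaaaaaaa\n",
   "f(\n        ,\n        aaaaaaaaaaaaaaaaaaaaaaaaaaaaaaaaaaaaaaaaaaaaaaaaaaaaaaaaaaaaaaaaaaaaaaaaaaaaaaaaaa\n")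

-- ===== CLAIM (what is proved, stated in full; the proofs are below) =====
def Claim_unchanged_generate_api_func_cleanup : Prop := ∀ (func : String), Dom_generate_api_func_cleanup func → Pre_generate_api_func_cleanup func → Spec_generate_api_func_cleanup func (generate_api_func_cleanup func)
def Claim_changed_generate_api_func_cleanup : Prop := Dom_generate_api_func_cleanup (pvDiffWitness_generate_api_func_cleanup) ∧ Pre_generate_api_func_cleanup (pvDiffWitness_generate_api_func_cleanup) ∧ D_generate_api_func_cleanup (pvDiffWitness_generate_api_func_cleanup) ∧ generate_api_func_cleanup (pvDiffWitness_generate_api_func_cleanup) = pvDiffWitnessOut_generate_api_func_cleanup.1 ∧ generate_api_func_cleanup_alt (pvDiffWitness_generate_api_func_cleanup) = pvDiffWitnessOut_generate_api_func_cleanup.2 ∧ pvDiffWitnessOut_generate_api_func_cleanup.1 ≠ pvDiffWitnessOut_generate_api_func_cleanup.2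
def Claim_exact_generate_api_func_cleanup : Prop := ∀ (func : String), Dom_generate_api_func_cleanup func → Pre_generate_api_func_cleanup func → D_generate_api_func_cleanup func → generate_api_func_cleanup func ≠ generate_api_func_cleanup_alt func

-- ===== LEMMAS AND PROOFS =====

-- proof-side vocabulary
def cdelta (c : Char) : Int := if c = '<' then 1 else if c = '>' then -1 else 0
def cnt (l : List Char) : Int := (l.count '<' : Int) - (l.count '>' : Int)
def sepNL : List Char := ",\n        ".toList
def sepCS : List Char := [',', ' ']

def consHead (a : List Char) : List (List Char) → List (List Char)
  | [] => [a]
  | t :: ts => (a ++ t) :: ts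

def consHead' (c : Char) : List (List Char) → List (List Char)
  | [] => [[c]]
  | t :: ts => (c :: t) :: ts

-- A's tokenisation funcy.split(', '), as a clean recursion
def tok : List Char → List (List Char)
  | [] => [[]]
  | ',' :: ' ' :: rest => [] :: tok rest
  | c :: rest => consHead' c (tok rest)

-- token-level description of B's scan: merge tokens while the running depth is nonzero
def mergeScan : List (List Char) → List Char → Int → List (List Char)
  | [], buf, _ => [buf]
  | [t], buf, _ => [buf ++ t]
  | t :: u :: us, buf, d =>
      if d + cnt t = 0 then (buf ++ t) :: mergeScan (u :: us) [] 0
      else mergeScan (u :: us) (buf ++ t ++ sepCS) (d + cnt t)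

theorem cnt_nil : cnt [] = 0 := by simp [cnt]

theorem cnt_cons (c : Char) (t : List Char) : cnt (c :: t) = cdelta c + cnt t := by
  simp only [cnt, cdelta, List.count_cons]
  split_ifs with h1 h2 <;> subst_vars <;> simp_all <;> omega

-- one-step unfoldings of PySem's fuel recursions (definitional once fuel and list are constructors)
theorem countGo_step (sub : List Char) (f : Nat) (c : Char) (rest : List Char) (acc : Nat) :
    PySem.Chars.count.go sub (f+1) (c::rest) acc
      = if sub.isPrefixOf (c::rest) then PySem.Chars.count.go sub f (List.drop sub.length (c::rest)) (acc+1)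
        else PySem.Chars.count.go sub f rest acc := by
  rw [PySem.Chars.count.go.eq_def]

theorem splitOnGo_step (sep : List Char) (f : Nat) (c : Char) (rest cur : List Char) (acc : List (List Char)) :
    PySem.Chars.splitOn.go sep (f+1) (c::rest) cur acc
      = if sep.isPrefixOf (c::rest) then PySem.Chars.splitOn.go sep f (List.drop sep.length (c::rest)) [] (cur.reverse :: acc)
        else PySem.Chars.splitOn.go sep f rest (c :: cur) acc := by
  rw [PySem.Chars.splitOn.go.eq_def]

theorem splitOnMaxGo_step (sep : List Char) (f m : Nat) (c : Char) (rest cur : List Char) (acc : List (List Char)) :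
    PySem.Chars.splitOnMax.go sep (f+1) m (c::rest) cur acc
      = if m = 0 then ((cur.reverse ++ (c::rest)) :: acc).reverse
        else if sep.isPrefixOf (c::rest) then PySem.Chars.splitOnMax.go sep f (m-1) (List.drop sep.length (c::rest)) [] (cur.reverse :: acc)
        else PySem.Chars.splitOnMax.go sep f m rest (c :: cur) acc := by
  rw [PySem.Chars.splitOnMax.go.eq_def]

theorem cnt_append (a b : List Char) : cnt (a ++ b) = cnt a + cnt b := by
  simp [cnt]; omega

theorem cnt_sepNL : cnt sepNL = 0 := by decide
theorem cnt_sepCS : cnt sepCS = 0 := by decide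

theorem depth_if (c : Char) (d : Int) :
    (if c = '<' then d + 1 else if c = '>' then d - 1 else d) = d + cdelta c := by
  simp [cdelta]; split_ifs <;> omega

-- equation lemmas for the overlapping-pattern recursions
theorem scanParams_cut (rest buf : List Char) :
    scanParams (',' :: ' ' :: rest) buf 0 = buf :: scanParams rest [] 0 := by
  simp [scanParams]

theorem scanParams_nocut (rest buf : List Char) (d : Int) (h : d ≠ 0) :
    scanParams (',' :: ' ' :: rest) buf d = scanParams rest (buf ++ [',', ' ']) d := by
  simp [scanParams, h]

theorem scanParams_gen (c : Char) (rest buf : List Char) (d : Int)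
    (h : ¬(c = ',' ∧ rest.head? = some ' ')) :
    scanParams (c :: rest) buf d
      = scanParams rest (buf ++ [c]) (d + cdelta c) := by
  rw [← depth_if c d, scanParams.eq_def]
  rcases rest with _ | ⟨r, rs⟩
  · by_cases hc : c = ',' <;> simp_all [scanParams]
  · by_cases hc : c = ',' <;> by_cases hr : r = ' ' <;> simp_all [scanParams]

theorem tok_cut (rest : List Char) : tok (',' :: ' ' :: rest) = [] :: tok rest := by
  simp [tok]

theorem tok_gen (c : Char) (rest : List Char) (h : ¬(c = ',' ∧ rest.head? = some ' ')) :
    tok (c :: rest) = consHead' c (tok rest) := by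
  rw [tok.eq_def]
  rcases rest with _ | ⟨r, rs⟩
  · by_cases hc : c = ',' <;> simp_all [tok]
  · by_cases hc : c = ',' <;> by_cases hr : r = ' ' <;> simp_all [tok]

theorem count_singleton_go (c : Char) (fuel : Nat) :
    ∀ (z : List Char) (acc : Nat), z.length ≤ fuel →
      PySem.Chars.count.go [c] fuel z acc = acc + z.count c := by
  induction fuel with
  | zero => intro z acc h; rw [List.length_eq_zero_iff.mp (Nat.le_zero.mp h)]; simp [PySem.Chars.count.go]
  | succ n ih =>
      intro z acc h
      rcases z with _ | ⟨a, t⟩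
      · simp [PySem.Chars.count.go]
      · rw [countGo_step]
        by_cases hac : c = a
        · subst hac
          rw [if_pos (by simp [List.isPrefixOf])]
          simp only [List.length_singleton, List.drop_succ_cons, List.drop_zero]
          rw [ih t (acc + 1) (by simpa using h)]
          simp [List.count_cons]; omega
        · rw [if_neg (by simp [List.isPrefixOf]; intro h'; first | exact hac h' | exact hac h'.symm)]
          rw [ih t acc (by simpa using h)]
          simp only [List.count_cons]
          have hca : ¬ a = c := fun h' => hac h'.symm
          simp [hca]
  
theorem count_singleton (z : List Char) (c : Char) : PySem.Chars.count z [c] = z.count c := by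
  unfold PySem.Chars.count
  simp only [List.isEmpty_cons, if_false, Bool.false_eq_true]
  simpa using count_singleton_go c z.length z 0 le_rfl

theorem consHead'_ne_nil (c : Char) (ps : List (List Char)) : consHead' c ps ≠ [] := by
  cases ps <;> simp [consHead']

theorem tok_ne_nil (l : List Char) : tok l ≠ [] := by
  rw [tok.eq_def]
  rcases l with _ | ⟨c, rest⟩
  · simp
  · rcases rest with _ | ⟨r, rs⟩
    · by_cases hc : c = ',' <;> simp_all [consHead'_ne_nil]
    · by_cases hc : c = ',' <;> by_cases hr : r = ' ' <;> simp_all [consHead'_ne_nil]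

theorem consHead_consHead' (a : List Char) (c : Char) (ps : List (List Char)) :
    consHead a (consHead' c ps) = consHead (a ++ [c]) ps := by
  cases ps <;> simp [consHead, consHead']

theorem consHead_nil_of_ne (ps : List (List Char)) (h : ps ≠ []) : consHead [] ps = ps := by
  cases ps with
  | nil => exact absurd rfl h
  | cons t ts => simp [consHead]

theorem splitOn_go_eq_tok (fuel : Nat) :
    ∀ (l cur : List Char) (acc : List (List Char)), l.length < fuel →
      PySem.Chars.splitOn.go [',', ' '] fuel l cur acc
        = acc.reverse ++ consHead cur.reverse (tok l) := by
  induction fuel with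
  | zero => intro l cur acc h; omega
  | succ n ih =>
      intro l cur acc h
      rcases l with _ | ⟨c, rest⟩
      · simp [PySem.Chars.splitOn.go, tok, consHead]
      · rw [splitOnGo_step]
        rcases rest with _ | ⟨r, rs⟩
        · have hpre : List.isPrefixOf [',', ' '] [c] = false := by
            simp [List.isPrefixOf]
          rw [hpre]
          simp only [Bool.false_eq_true, if_false]
          rw [ih [] (c :: cur) acc (by simp at h ⊢; omega)]
          rw [tok_gen c [] (by simp)]
          simp [tok, consHead, consHead', consHead_consHead']
        · by_cases hcr : c = ',' ∧ r = ' '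
          · obtain ⟨hc, hr⟩ := hcr; subst hc; subst hr
            have hpre : List.isPrefixOf [',', ' '] (',' :: ' ' :: rs) = true := by
              simp [List.isPrefixOf]
            rw [hpre]
            simp only [if_true, List.length_cons, List.length_nil, List.drop_succ_cons, List.drop_zero]
            rcases hts : tok rs with _ | ⟨t, ts⟩
            · exact absurd hts (tok_ne_nil rs)
            · rw [ih rs [] (cur.reverse :: acc) (by simp at h ⊢; omega)]
              rw [tok_cut, hts]
              simp [consHead]
          · have hpre : List.isPrefixOf [',', ' '] (c :: r :: rs) = false := by
              rcases (not_and_or.mp hcr) with hc | hr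
              · simp [List.isPrefixOf]; intro h'; exact absurd h'.symm hc
              · simp [List.isPrefixOf]; intro _ h'; exact absurd h'.symm hr
            rw [hpre]
            simp only [Bool.false_eq_true, if_false]
            rw [ih (r :: rs) (c :: cur) acc (by simp at h ⊢; omega)]
            rw [tok_gen c (r :: rs) (by rintro ⟨hc, hr⟩; simp at hr; exact hcr ⟨hc, hr⟩)]
            simp [consHead_consHead']

theorem splitOn_eq_tok (cs : List Char) :
    PySem.Chars.splitOn cs [',', ' '] = tok cs := by
  unfold PySem.Chars.splitOn
  rw [splitOn_go_eq_tok (cs.length + 1) cs [] [] (by omega)]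
  simpa using consHead_nil_of_ne _ (tok_ne_nil cs)

theorem mergeScan_ne_nil (ts : List (List Char)) : ∀ (buf : List Char) (d : Int),
    mergeScan ts buf d ≠ [] := by
  induction ts with
  | nil => intro buf d; simp [mergeScan]
  | cons t ts ih =>
      intro buf d
      rcases ts with _ | ⟨u, us⟩
      · simp [mergeScan]
      · rw [mergeScan]
        split_ifs
        · simp
        · exact ih _ _

theorem mergeScan_cut (t u : List Char) (us : List (List Char)) (buf : List Char) (d : Int)
    (h : d + cnt t = 0) :
    mergeScan (t :: u :: us) buf d = (buf ++ t) :: mergeScan (u :: us) [] 0 := by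
  rw [mergeScan, if_pos h]

theorem mergeScan_keep (t u : List Char) (us : List (List Char)) (buf : List Char) (d : Int)
    (h : ¬ d + cnt t = 0) :
    mergeScan (t :: u :: us) buf d = mergeScan (u :: us) (buf ++ t ++ sepCS) (d + cnt t) := by
  rw [mergeScan, if_neg h]

theorem mergeScan_buf (ts : List (List Char)) : ∀ (a b : List Char) (d : Int),
    mergeScan ts (a ++ b) d = consHead a (mergeScan ts b d) := by
  induction ts with
  | nil => intro a b d; simp [mergeScan, consHead]
  | cons t ts ih =>
      intro a b d
      rcases ts with _ | ⟨u, us⟩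
      · simp [mergeScan, consHead]
      · by_cases h0 : d + cnt t = 0
        · rw [mergeScan_cut _ _ _ _ _ h0, mergeScan_cut _ _ _ _ _ h0]
          simp [consHead]
        · rw [mergeScan_keep _ _ _ _ _ h0, mergeScan_keep _ _ _ _ _ h0]
          rw [show (a ++ b) ++ t ++ sepCS = a ++ (b ++ t ++ sepCS) by simp, ih]

theorem mergeScan_consHead' (c : Char) (ps : List (List Char)) (buf : List Char) (d : Int) :
    mergeScan (consHead' c ps) buf d = mergeScan ps (buf ++ [c]) (d + cdelta c) := by
  rcases ps with _ | ⟨t, ts⟩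
  · simp [consHead', mergeScan]
  · rcases ts with _ | ⟨u, us⟩
    · simp [consHead', mergeScan]
    · rw [consHead']
      have hc : d + cnt (c :: t) = (d + cdelta c) + cnt t := by rw [cnt_cons]; ring
      by_cases h0 : (d + cdelta c) + cnt t = 0
      · rw [mergeScan_cut _ _ _ _ _ (by omega), mergeScan_cut _ _ _ _ _ h0]
        simp
      · rw [mergeScan_keep _ _ _ _ _ (by omega), mergeScan_keep _ _ _ _ _ h0, hc]
        rw [show buf ++ (c :: t) ++ sepCS = (buf ++ [c]) ++ t ++ sepCS by simp]

theorem scan_eq_merge (n : Nat) : ∀ (cs : List Char), cs.length ≤ n → ∀ (buf : List Char) (d : Int),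
    scanParams cs buf d = mergeScan (tok cs) buf d := by
  induction n with
  | zero =>
      intro cs h buf d
      rw [List.length_eq_zero_iff.mp (Nat.le_zero.mp h)]
      simp [scanParams, tok, mergeScan]
  | succ n ih =>
      intro cs h buf d
      rcases cs with _ | ⟨c, rest⟩
      · simp [scanParams, tok, mergeScan]
      · by_cases hcr : c = ',' ∧ rest.head? = some ' '
        · obtain ⟨hc, hr⟩ := hcr
          subst hc
          rcases rest with _ | ⟨r, rs⟩
          · simp at hr
          · simp only [List.head?_cons, Option.some.injEq] at hr
            subst hr
            rw [tok_cut]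
            rcases hts : tok rs with _ | ⟨t, ts⟩
            · exact absurd hts (tok_ne_nil rs)
            · by_cases hd : d = 0
              · subst hd
                rw [scanParams_cut, mergeScan_cut _ _ _ _ _ (by simp [cnt_nil]), ← hts]
                rw [ih rs (by simp at h; omega) [] 0]
                simp
              · rw [scanParams_nocut _ _ _ hd,
                    mergeScan_keep _ _ _ _ _ (by simp [cnt_nil, hd]), ← hts]
                rw [ih rs (by simp at h; omega) (buf ++ [',', ' ']) d]
                simp [cnt_nil, sepCS]
        · rw [scanParams_gen c rest buf d hcr, tok_gen c rest hcr, mergeScan_consHead']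
          exact ih rest (by simp at h; omega) _ _

theorem join_consHead (a : List Char) (ps : List (List Char)) (h : ps ≠ []) :
    PySem.Chars.join sepNL (consHead a ps) = a ++ PySem.Chars.join sepNL ps := by
  rcases ps with _ | ⟨t, ts⟩
  · exact absurd rfl h
  · rcases ts with _ | ⟨u, us⟩
    · simp [consHead, PySem.Chars.join_singleton]
    · rw [consHead, PySem.Chars.join_cons_cons, PySem.Chars.join_cons_cons]
      simp

theorem cnt_eq_zero_iff (z : List Char) : cnt z = 0 ↔ z.count '<' = z.count '>' := by
  unfold cnt; omega

theorem funczStep_eq (z x : List Char) (d : Int) (hz : cnt z = d) (hne : z ≠ []) :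
    funczStep z x = z ++ (if d = 0 then sepNL else sepCS) ++ x := by
  simp only [funczStep]
  have h1 : PySem.Chars.count z "<".toList = z.count '<' := count_singleton z '<'
  have h2 : PySem.Chars.count z ">".toList = z.count '>' := count_singleton z '>'
  rw [h1, h2]
  by_cases hd : d = 0
  · have hc : z.count '<' = z.count '>' := (cnt_eq_zero_iff z).mp (by rw [hz, hd])
    rw [if_pos hc, if_pos hd, if_pos hne]
    simp [sepNL]
  · rw [if_neg (fun hc => hd (by rw [← hz]; exact (cnt_eq_zero_iff z).mpr hc)), if_neg hd, if_pos hne]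
    simp [sepCS]

theorem funczStep_nil (x : List Char) : funczStep [] x = x := by
  simp [funczStep]

theorem foldA_merge (ts : List (List Char)) : ∀ (z : List Char) (d : Int),
    ts ≠ [] → cnt z = d → z ≠ [] →
    ts.foldl funczStep z =
      z ++ (if d = 0 then sepNL else sepCS) ++ PySem.Chars.join sepNL (mergeScan ts [] d) := by
  induction ts with
  | nil => intro z d hts; exact absurd rfl hts
  | cons t ts ih =>
      intro z d _ hz hne
      rw [List.foldl_cons, funczStep_eq z t d hz hne]
      rcases ts with _ | ⟨u, us⟩
      · simp [mergeScan, PySem.Chars.join_singleton]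
      · set S := (if d = 0 then sepNL else sepCS) with hS
        have hcS : cnt S = 0 := by rw [hS]; split_ifs; exact cnt_sepNL; exact cnt_sepCS
        have hz' : cnt (z ++ S ++ t) = d + cnt t := by
          rw [cnt_append, cnt_append, hcS, hz]; ring
        have hne' : z ++ S ++ t ≠ [] := by
          simp only [List.append_assoc, ne_eq, List.append_eq_nil_iff]
          rintro ⟨h1, -⟩; exact hne h1
        by_cases h0 : d + cnt t = 0
        · rw [mergeScan_cut _ _ _ _ _ h0]
          rcases hm : mergeScan (u :: us) [] 0 with _ | ⟨p, ps⟩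
          · exact absurd hm (mergeScan_ne_nil _ [] 0)
          · rw [List.nil_append, PySem.Chars.join_cons_cons, ← hm]
            rw [ih (z ++ S ++ t) 0 (by simp) (hz'.trans h0) hne']
            simp
        · rw [mergeScan_keep _ _ _ _ _ h0]
          rw [ih (z ++ S ++ t) (d + cnt t) (by simp) hz' hne']
          rw [if_neg h0]
          rw [show ([] : List Char) ++ t ++ sepCS = (t ++ sepCS) ++ [] by simp]
          rw [mergeScan_buf, join_consHead _ _ (mergeScan_ne_nil _ [] _)]
          simp
  
theorem core_eq (cs : List Char) (h : ¬ ([',', ' '] <+: cs)) :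
    (tok cs).foldl funczStep [] = PySem.Chars.join sepNL (scanParams cs [] 0) := by
  rw [scan_eq_merge cs.length cs le_rfl [] 0]
  rcases cs with _ | ⟨c, rest⟩
  · simp [tok, mergeScan, funczStep_nil, PySem.Chars.join_singleton]
  · have hcr : ¬(c = ',' ∧ rest.head? = some ' ') := by
      rintro ⟨hc, hr⟩
      subst hc
      rcases rest with _ | ⟨r, rs⟩
      · simp at hr
      · simp only [List.head?_cons, Option.some.injEq] at hr
        subst hr
        exact h ⟨rs, rfl⟩
    rw [tok_gen c rest hcr]
    rcases hts : tok rest with _ | ⟨t, ts⟩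
    · exact absurd hts (tok_ne_nil rest)
    · rw [consHead']
      rw [List.foldl_cons, funczStep_nil]
      rcases ts with _ | ⟨u, us⟩
      · simp [mergeScan, PySem.Chars.join_singleton]
      · rw [foldA_merge (u :: us) (c :: t) (cnt (c :: t)) (by simp) rfl (by simp)]
        by_cases h0 : cnt (c :: t) = 0
        · rw [mergeScan_cut _ _ _ _ _ (by omega), if_pos h0]
          rcases hm : mergeScan (u :: us) [] 0 with _ | ⟨p, ps⟩
          · exact absurd hm (mergeScan_ne_nil _ [] 0)
          · rw [List.nil_append, PySem.Chars.join_cons_cons, h0, hm]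
        · rw [mergeScan_keep _ _ _ _ _ (by omega), if_neg h0]
          rw [show ([] : List Char) ++ (c :: t) ++ sepCS = ((c :: t) ++ sepCS) ++ [] by simp]
          rw [mergeScan_buf, join_consHead _ _ (mergeScan_ne_nil _ [] _)]
          simp

theorem splitOnMax_go0 (fuel : Nat) (l cur : List Char) (acc : List (List Char)) (h : 0 < fuel) :
    PySem.Chars.splitOnMax.go ['('] fuel 0 l cur acc = acc.reverse ++ [cur.reverse ++ l] := by
  rcases fuel with _ | n
  · omega
  · rw [PySem.Chars.splitOnMax.go.eq_def]
    rcases l with _ | ⟨c, rest⟩ <;> simp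

theorem splitOnMax_go1 (fuel : Nat) : ∀ (l cur : List Char) (acc : List (List Char)),
    l.length < fuel →
    PySem.Chars.splitOnMax.go ['('] fuel 1 l cur acc
      = acc.reverse ++ (if '(' ∈ l then [cur.reverse ++ l.takeWhile (· ≠ '('), (l.dropWhile (· ≠ '(')).tail]
                        else [cur.reverse ++ l]) := by
  induction fuel with
  | zero => intro l cur acc h; omega
  | succ n ih =>
      intro l cur acc h
      rcases l with _ | ⟨c, rest⟩
      · rw [PySem.Chars.splitOnMax.go.eq_def]; simp
      · rw [splitOnMaxGo_step, if_neg (by omega : ¬ (1:Nat) = 0)]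
        by_cases hc : c = '('
        · subst hc
          rw [if_pos (by simp [List.isPrefixOf])]
          rw [show List.drop (['('] : List Char).length ('(' :: rest) = rest from rfl]
          rw [show (1 : Nat) - 1 = 0 from rfl]
          rw [splitOnMax_go0 n rest [] (cur.reverse :: acc) (by simp at h; omega)]
          simp [List.takeWhile, List.dropWhile]
        · rw [if_neg (by simp [List.isPrefixOf]; intro h'; first | exact hc h' | exact hc h'.symm)]
          rw [ih rest (c :: cur) acc (by simp at h; omega)]
          have hceq : ¬ '(' = c := fun h' => hc h'.symm
          by_cases hm : '(' ∈ rest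
          · rw [if_pos hm, if_pos (by simp [hm])]
            simp [List.takeWhile, List.dropWhile, hc, hceq]
          · rw [if_neg hm, if_neg (by simp [hm, hceq])]
            simp

theorem splitOnMax_paren (cs : List Char) :
    PySem.Chars.splitOnMax cs ['('] 1 =
      if '(' ∈ cs then [cs.takeWhile (· ≠ '('), (cs.dropWhile (· ≠ '(')).tail]
      else [cs] := by
  unfold PySem.Chars.splitOnMax
  rw [if_neg (by omega)]
  rw [show ((1 : Int)).toNat = 1 from rfl]
  rw [splitOnMax_go1 (cs.length + 1) cs [] [] (by omega)]
  simp

theorem scanParams_ne_nil (cs buf : List Char) (d : Int) : scanParams cs buf d ≠ [] := by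
  rw [scan_eq_merge cs.length cs le_rfl buf d]
  exact mergeScan_ne_nil _ _ _

theorem sepNL_length : sepNL.length = 10 := by decide

-- inside D_: A drops each leading ', ' of funcy (10 output characters each), so B's result is strictly longer
theorem lead_len_lt (n : Nat) : ∀ (cs : List Char), cs.length ≤ n → [',', ' '] <+: cs →
    ((tok cs).foldl funczStep []).length
      < (PySem.Chars.join sepNL (scanParams cs [] 0)).length := by
  induction n with
  | zero =>
      intro cs h hpre
      obtain ⟨t, ht⟩ := hpre
      subst ht
      simp at h
  | succ n ih =>
      intro cs h hpre
      obtain ⟨t, ht⟩ := hpre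
      subst ht
      simp only [List.cons_append, List.nil_append] at h ⊢
      rw [tok_cut, List.foldl_cons, funczStep_nil, scanParams_cut]
      rcases hsc : scanParams t [] 0 with _ | ⟨q, qs⟩
      · exact absurd hsc (scanParams_ne_nil t [] 0)
      · rw [PySem.Chars.join_cons_cons, ← hsc]
        by_cases hrt : [',', ' '] <+: t
        · have hlt := ih t (by simp at h; omega) hrt
          have h10 := sepNL_length
          simp only [List.nil_append, List.length_append]
          omega
        · rw [← core_eq t hrt]
          have h10 := sepNL_length
          simp only [List.nil_append, List.length_append]
          omega

-- ===== VERDICT (by name: the statement is the Claim_ definition above) =====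
theorem str_splitMax_paren (p : String) :
    PySem.Str.splitMax? p "(" 1 =
      some (if '(' ∈ p.toList
            then [String.ofList (p.toList.takeWhile (· ≠ '(')),
                  String.ofList ((p.toList.dropWhile (· ≠ '(')).tail)]
            else [String.ofList p.toList]) := by
  unfold PySem.Str.splitMax? PySem.Chars.splitMax?
  rw [show ("(" : String).toList = ['('] from rfl]
  rw [if_neg (by simp), splitOnMax_paren]
  split_ifs <;> simp

set_option maxHeartbeats 1000000 in
theorem generate_api_func_cleanup_spec : Claim_unchanged_generate_api_func_cleanup := by
  intro func _ hpre hnd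
  show generate_api_func_cleanup func = generate_api_func_cleanup_alt func
  unfold generate_api_func_cleanup generate_api_func_cleanup_alt
  unfold Pre_generate_api_func_cleanup at hpre
  unfold D_generate_api_func_cleanup at hnd
  set p := PySem.Str.replace (PySem.Str.stripChars (PySem.Str.strip func) ";") "native " "" with hp
  clear_value p
  clear hp
  by_cases hlen : 85 < PySem.Str.len p
  · rw [if_pos hlen, if_pos hlen]
    by_cases hmem : '(' ∈ p.toList
    · have hq : PySem.Str.splitMax? p "(" 1
          = some [String.ofList (p.toList.takeWhile (· ≠ '(')),
                  String.ofList ((p.toList.dropWhile (· ≠ '(')).tail)] := by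
        rw [str_splitMax_paren p, if_pos hmem]
      rw [hq]
      set x := String.ofList (p.toList.takeWhile (· ≠ '(')) with hx
      set y := String.ofList ((p.toList.dropWhile (· ≠ '(')).tail) with hy
      clear_value x y
      show (x ++ "(\n" ++ "        " ++
              String.ofList ((PySem.Chars.splitOn y.toList ", ".toList).foldl funczStep [])) ++ "\n"
          = (if ((some [x, y]).getD ([] : List String)).length = 2 then
               ((some [x, y]).getD ([] : List String)).headI ++ "(\n" ++ "        "
                 ++ String.ofList (PySem.Chars.join ",\n        ".toList
                      (scanParams (((some [x, y]).getD ([] : List String)).tail.headI).toList [] 0))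
             else p) ++ "\n"
      rw [if_pos (by simp)]
      show (x ++ "(\n" ++ "        " ++
              String.ofList ((PySem.Chars.splitOn y.toList ", ".toList).foldl funczStep [])) ++ "\n"
          = (x ++ "(\n" ++ "        " ++
              String.ofList (PySem.Chars.join ",\n        ".toList (scanParams y.toList [] 0))) ++ "\n"
      have hyl : y.toList = (p.toList.dropWhile (· ≠ '(')).tail := by rw [hy]; simp
      have hnp : ¬ ([',', ' '] <+: y.toList) := by
        rw [hyl]
        intro hpre'
        exact hnd ⟨hlen, hmem, hpre'⟩
      rw [show (", " : String).toList = [',', ' '] from rfl, splitOn_eq_tok]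
      rw [core_eq y.toList hnp]
      rfl
    · have hq : PySem.Str.splitMax? p "(" 1 = some [String.ofList p.toList] := by
        rw [str_splitMax_paren p, if_neg hmem]
      rw [hq]
      rfl
  · rw [if_neg hlen, if_neg hlen]

theorem generate_api_func_cleanup_changed : Claim_changed_generate_api_func_cleanup := by
  unfold Claim_changed_generate_api_func_cleanup; decide

set_option maxHeartbeats 1000000 in
theorem generate_api_func_cleanup_tight : Claim_exact_generate_api_func_cleanup := by
  intro func _ _ hd heq
  unfold D_generate_api_func_cleanup at hd
  obtain ⟨hlen, hmem, hpw⟩ := hd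
  unfold generate_api_func_cleanup generate_api_func_cleanup_alt at heq
  set p := PySem.Str.replace (PySem.Str.stripChars (PySem.Str.strip func) ";") "native " "" with hp
  clear_value p
  clear hp
  rw [if_pos hlen, if_pos hlen] at heq
  have hq : PySem.Str.splitMax? p "(" 1
      = some [String.ofList (p.toList.takeWhile (· ≠ '(')),
              String.ofList ((p.toList.dropWhile (· ≠ '(')).tail)] := by
    rw [str_splitMax_paren p, if_pos hmem]
  rw [hq] at heq
  set x := String.ofList (p.toList.takeWhile (· ≠ '(')) with hx
  set y := String.ofList ((p.toList.dropWhile (· ≠ '(')).tail) with hy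
  clear_value x
  have hyl : y.toList = (p.toList.dropWhile (· ≠ '(')).tail := by rw [hy]; simp
  clear_value y
  have heq2 : (x ++ "(\n" ++ "        " ++
        String.ofList ((PySem.Chars.splitOn y.toList ", ".toList).foldl funczStep [])) ++ "\n"
      = (x ++ "(\n" ++ "        " ++
        String.ofList (PySem.Chars.join ",\n        ".toList (scanParams y.toList [] 0))) ++ "\n" := by
    rw [heq]
    rfl
  have hpw' : [',', ' '] <+: y.toList := by rw [hyl]; exact hpw
  have hlt := lead_len_lt y.toList.length y.toList le_rfl hpw'
  rw [show (", " : String).toList = [',', ' '] from rfl, splitOn_eq_tok] at heq2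
  have hlen2 := congrArg String.length heq2
  simp only [String.length_append, String.length_ofList] at hlen2
  unfold sepNL at hlt
  omega
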